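-- pv_equiv track=rewrite | github.com/Cryptoseev/pdd-exam-app | scripts/parse-pdf-questions.py | has_image_before_question
-- ===== SOURCE A (Python) =====
-- def has_image_before_question(text_before_answer_start: str) -> bool:
--     """Check if there are 2+ blank lines before the question text (indicating image)."""
--     lines = text_before_answer_start.split('\n')
--     blank_count = 0
--     for line in lines:
--         if line.strip() == '':
--             blank_count += 1
--         else:
--             break
--     return blank_count >= 2
-- ===== SOURCE B (Python) =====
-- def has_image_before_question(text_before_answer_start: str) -> bool:
--     """Check if there are 2+ blank lines before the question text (indicating image)."""
--     lines = text_before_answer_start.split('\n')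
--     return len(lines) >= 2 and lines[0].strip() == '' and lines[1].strip() == ''
-- ===== Notes on version B (the rewrite author's own statement) =====
-- stated objective: simpler
-- what changed: Replaced the count-and-break loop over all lines with a closed-form boolean over the first two line positions, since the count can only reach 2 when lines[0] and lines[1] are both blank.
import Mathlib
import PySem

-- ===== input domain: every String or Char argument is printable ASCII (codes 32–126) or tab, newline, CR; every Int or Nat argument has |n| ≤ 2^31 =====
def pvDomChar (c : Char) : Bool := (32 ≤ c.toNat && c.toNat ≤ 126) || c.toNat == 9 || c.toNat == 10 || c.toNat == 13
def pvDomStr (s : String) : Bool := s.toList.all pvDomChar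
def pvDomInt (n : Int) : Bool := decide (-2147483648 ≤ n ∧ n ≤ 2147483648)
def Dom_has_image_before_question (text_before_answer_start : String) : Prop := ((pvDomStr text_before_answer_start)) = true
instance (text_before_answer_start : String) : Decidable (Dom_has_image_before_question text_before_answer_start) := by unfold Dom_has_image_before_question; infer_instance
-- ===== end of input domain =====

-- ===== PORT A =====
-- A: count leading blank lines with an early-exit loop, then compare with 2.
def pvBlankLoop : List String → Nat → Nat
  | [], blank_count => blank_count
  | line :: rest, blank_count =>
    if PySem.Str.strip line == "" then pvBlankLoop rest (blank_count + 1)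
    else blank_count

def has_image_before_question (text_before_answer_start : String) : Bool :=
  let lines := (PySem.Str.split? text_before_answer_start "\n").getD []
  decide (2 ≤ pvBlankLoop lines 0)

-- ===== PORT B =====
-- B: closed-form boolean over the first two line positions (header: simpler, no loop).
def has_image_before_question_alt (text_before_answer_start : String) : Bool :=
  let lines := (PySem.Str.split? text_before_answer_start "\n").getD []
  decide (2 ≤ lines.length) && (PySem.Str.strip (lines.getD 0 "") == "")
    && (PySem.Str.strip (lines.getD 1 "") == "")

-- ===== PRECONDITION & SPEC =====
def Spec_has_image_before_question (text_before_answer_start : String) (out : Bool) : Prop := out = has_image_before_question_alt text_before_answer_start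
instance (text_before_answer_start : String) (out : Bool) : Decidable (Spec_has_image_before_question text_before_answer_start out) := by unfold Spec_has_image_before_question; infer_instance

-- ===== CLAIM (what is proved, stated in full; the proofs are below) =====
def Claim_equal_has_image_before_question : Prop := ∀ (text_before_answer_start : String), Dom_has_image_before_question text_before_answer_start → Spec_has_image_before_question text_before_answer_start (has_image_before_question text_before_answer_start)

-- ===== LEMMAS AND PROOFS =====

-- ===== VERDICT (by name: the statement is the Claim_ definition above) =====
theorem pvBlankLoop_ge (l : List String) (c : Nat) : c ≤ pvBlankLoop l c := by
  induction l generalizing c with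
  | nil => simp [pvBlankLoop]
  | cons a rest ih =>
    simp only [pvBlankLoop]
    split
    · exact le_trans (Nat.le_succ c) (ih (c + 1))
    · exact le_refl c

theorem pvCore (lines : List String) :
    decide (2 ≤ pvBlankLoop lines 0)
      = (decide (2 ≤ lines.length) && (PySem.Str.strip (lines.getD 0 "") == "")
          && (PySem.Str.strip (lines.getD 1 "") == "")) := by
  match lines with
  | [] => simp [pvBlankLoop]
  | [a] =>
    simp only [pvBlankLoop]
    split <;> simp
  | a :: b :: rest =>
    simp only [pvBlankLoop, List.getD]
    by_cases ha : PySem.Str.strip a == ""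
    · by_cases hb : PySem.Str.strip b == ""
      · simp [ha, hb, eq_of_beq ha, eq_of_beq hb, pvBlankLoop_ge rest 2]
      · simp [ha, hb]
    · simp [ha]

theorem has_image_before_question_spec : Claim_equal_has_image_before_question := by
  intro s _
  unfold Spec_has_image_before_question has_image_before_question has_image_before_question_alt
  exact pvCore _
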